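-- pv_equiv track=rewrite | github.com/Minidoracat/MinidoracatLangFor42 | scripts/sync_translations.py | _validate_print_media_info
-- ===== SOURCE A (Python) =====
-- def _validate_print_media_info(key: str, value: str) -> str | None:
--     """檢查 Print_Media _info 值是否被截斷。
--
--     Returns:
--         錯誤描述字串，None 表示無問題。
--     """
--     if not key.endswith("_info"):
--         return None
--
--     # 檢查 getTexture( 是否有配對的 )
--     pos = 0
--     while True:
--         idx = value.find("getTexture(", pos)
--         if idx == -1:
--             break
--         paren_start = idx + len("getTexture(")
--         close_pos = value.find(")", paren_start)
--         if close_pos == -1: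
--             return "getTexture( 缺少閉合括號 — 值被截斷"
--         pos = close_pos + 1
--
--     # 檢查最後一個 < 是否有對應的 >
--     last_open = value.rfind("<")
--     if last_open != -1:
--         last_close = value.rfind(">")
--         if last_close < last_open:
--             return "未閉合的 <type:...> 標籤 — 值被截斷"
--
--     return None
-- ===== SOURCE B (Python) =====
-- def _validate_print_media_info(key: str, value: str) -> str | None:
--     """檢查 Print_Media _info 值是否被截斷。
--
--     Returns:
--         錯誤描述字串，None 表示無問題。
--     """
--     if not key.endswith("_info"):
--         return None
--
--     # 一個 getTexture( 缺少閉合括號 ⟺ 最後一個 ')' 之後仍出現 getTexture(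
--     if "getTexture(" in value[value.rfind(")") + 1:]:
--         return "getTexture( 缺少閉合括號 — 值被截斷"
--
--     # 未閉合的 < ⟺ 最後一個 '>' 之後仍出現 '<'
--     if "<" in value[value.rfind(">") + 1:]:
--         return "未閉合的 <type:...> 標籤 — 值被截斷"
--
--     return None
-- ===== Notes on version B (the rewrite author's own statement) =====
-- stated objective: simpler
-- what changed: A's while-loop that repeatedly matches each 'getTexture(' against the next ')' is replaced by a single containment test on the region after the last ')' (every earlier occurrence is necessarily matched), and the '<'/'>' index comparison by the same 'after the last '>'' pattern.
import Mathlib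
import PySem

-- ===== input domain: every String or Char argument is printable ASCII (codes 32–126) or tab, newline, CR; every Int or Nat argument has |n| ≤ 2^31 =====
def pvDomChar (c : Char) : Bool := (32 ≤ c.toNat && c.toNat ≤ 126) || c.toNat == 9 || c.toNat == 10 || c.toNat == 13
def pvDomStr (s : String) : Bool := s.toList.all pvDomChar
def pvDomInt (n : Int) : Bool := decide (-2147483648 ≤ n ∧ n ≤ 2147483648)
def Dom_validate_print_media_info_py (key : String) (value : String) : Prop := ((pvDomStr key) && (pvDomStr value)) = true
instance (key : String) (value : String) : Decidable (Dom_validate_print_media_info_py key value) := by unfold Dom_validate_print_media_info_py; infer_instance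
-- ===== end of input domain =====

-- B replaces A's paren-matching while-loop by a single check on the region after the LAST ')' (and,
-- symmetrically, checks for '<' after the last '>'): simpler, same return value everywhere.

-- ===== PORT A =====
def pvGT : List Char := "getTexture(".toList

def pvErrParen : String := "getTexture( 缺少閉合括號 — 值被截斷"
def pvErrTag : String := "未閉合的 <type:...> 標籤 — 值被截斷"

-- facts the port's termination proof needs about value.find(sub, pos)
theorem pvFindFromOOB (cs sub : List Char) (k : Nat) (hk : cs.length < k) :
    PySem.Chars.findFrom cs sub (k : Int) none = -1 := by
  simp only [PySem.Chars.findFrom]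
  rw [if_neg (by omega : ¬ ((k : Int) < 0))]
  rw [if_pos (by exact_mod_cast hk)]

theorem pvFindFromSpec (cs sub : List Char) (hs : sub ≠ []) (k : Nat)
    (h : PySem.Chars.findFrom cs sub (k : Int) none ≠ -1) :
    (k : Int) ≤ PySem.Chars.findFrom cs sub (k : Int) none ∧
    sub <+: cs.drop (PySem.Chars.findFrom cs sub (k : Int) none).toNat ∧
    (PySem.Chars.findFrom cs sub (k : Int) none).toNat < cs.length := by
  by_cases hk : k ≤ cs.length
  · obtain ⟨h1, h2, _⟩ := PySem.Chars.findFrom_natCast_spec cs sub k hk h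
    refine ⟨h1, h2, ?_⟩
    have hne : cs.drop (PySem.Chars.findFrom cs sub (k : Int) none).toNat ≠ [] := by
      intro hnil
      exact hs (List.prefix_nil.mp (hnil ▸ h2))
    rw [ne_eq, List.drop_eq_nil_iff] at hne
    omega
  · exact absurd (pvFindFromOOB cs sub k (by omega)) h

-- A's while-loop: pos advances past the ')' matching each found 'getTexture('
-- idx = value.find("getTexture(", pos); paren_start = idx + 11; close_pos = value.find(")", paren_start)
def pvLoopA (cs : List Char) (pos : Nat) : Bool :=
  if hidx : PySem.Chars.findFrom cs pvGT (pos : Int) none = -1 then false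
  else if hcp : PySem.Chars.findFrom cs [')']
      (((PySem.Chars.findFrom cs pvGT (pos : Int) none).toNat + 11 : Nat) : Int) none = -1 then true
  else pvLoopA cs ((PySem.Chars.findFrom cs [')']
      (((PySem.Chars.findFrom cs pvGT (pos : Int) none).toNat + 11 : Nat) : Int) none).toNat + 1)
termination_by cs.length - pos
decreasing_by
  have h1 := pvFindFromSpec cs pvGT (by decide) pos hidx
  have h2 := pvFindFromSpec cs [')'] (by decide) _ hcp
  omega

def validate_print_media_info_py (key : String) (value : String) : Option String :=
  if !(PySem.Str.endswith key "_info") then none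
  else if pvLoopA value.toList 0 then some pvErrParen
  else
    let lastOpen := PySem.Chars.rfind value.toList ['<']
    if lastOpen ≠ -1 then
      let lastClose := PySem.Chars.rfind value.toList ['>']
      if lastClose < lastOpen then some pvErrTag else none
    else none

-- ===== PORT B =====
-- value[value.rfind(x) + 1:] is PySem.List.slice (rfind ≥ -1, so the start is ≥ 0)
def validate_print_media_info_py_alt (key : String) (value : String) : Option String :=
  if !(PySem.Str.endswith key "_info") then none
  else if PySem.Chars.isIn pvGT
      (PySem.List.slice value.toList (some (PySem.Chars.rfind value.toList [')'] + 1)) none) then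
    some pvErrParen
  else if PySem.Chars.isIn ['<']
      (PySem.List.slice value.toList (some (PySem.Chars.rfind value.toList ['>'] + 1)) none) then
    some pvErrTag
  else none

-- ===== PRECONDITION & SPEC =====
def Spec_validate_print_media_info_py (key : String) (value : String) (out : Option String) : Prop := out = validate_print_media_info_py_alt key value
instance (key : String) (value : String) (out : Option String) : Decidable (Spec_validate_print_media_info_py key value out) := by unfold Spec_validate_print_media_info_py; infer_instance

-- ===== CLAIM (what is proved, stated in full; the proofs are below) =====
def Claim_equal_validate_print_media_info_py : Prop := ∀ (key : String) (value : String), Dom_validate_print_media_info_py key value → Spec_validate_print_media_info_py key value (validate_print_media_info_py key value)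

-- ===== LEMMAS AND PROOFS =====

-- rfind's loop returns the highest index ≤ n at which sub is a prefix, or -1
theorem pvRfindGoGe (s sub : List Char) (n i : Nat) (hi : i ≤ n) (h : sub <+: s.drop i) :
    (i : Int) ≤ PySem.Chars.rfind.go s sub n := by
  induction n with
  | zero =>
    interval_cases i
    rw [PySem.Chars.rfind.go]
    simp only [List.drop_zero] at h
    simp [List.isPrefixOf_iff_prefix.mpr h]
  | succ m ih =>
    rw [PySem.Chars.rfind.go]
    by_cases hp : sub.isPrefixOf (s.drop (m + 1)) = true
    · simp only [hp, if_true]; exact_mod_cast Nat.cast_le.mpr hi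
    · simp only [hp]
      have hne : i ≠ m + 1 := by
        rintro rfl; exact hp (List.isPrefixOf_iff_prefix.mpr h)
      exact ih (by omega)

theorem pvRfindGoSpec (s sub : List Char) (n : Nat) (h : PySem.Chars.rfind.go s sub n ≠ -1) :
    0 ≤ PySem.Chars.rfind.go s sub n ∧
    sub <+: s.drop (PySem.Chars.rfind.go s sub n).toNat := by
  induction n with
  | zero =>
    rw [PySem.Chars.rfind.go] at h ⊢
    by_cases hp : sub.isPrefixOf s = true
    · simp only [hp, if_true]
      exact ⟨le_refl 0, by simpa using List.isPrefixOf_iff_prefix.mp hp⟩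
    · simp [hp] at h
  | succ m ih =>
    rw [PySem.Chars.rfind.go] at h ⊢
    by_cases hp : sub.isPrefixOf (s.drop (m + 1)) = true
    · simp only [hp, if_true]
      refine ⟨by positivity, ?_⟩
      simpa using List.isPrefixOf_iff_prefix.mp hp
    · simp only [hp] at h ⊢
      exact ih h

theorem pvRfindGoNeg (s sub : List Char) (n : Nat) : -1 ≤ PySem.Chars.rfind.go s sub n := by
  by_cases h : PySem.Chars.rfind.go s sub n = -1
  · omega
  · have := (pvRfindGoSpec s sub n h).1; omega

theorem pvRfindGe (s sub : List Char) (i : Nat) (hi : i ≤ s.length) (h : sub <+: s.drop i) :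
    (i : Int) ≤ PySem.Chars.rfind s sub := pvRfindGoGe s sub s.length i hi h

theorem pvRfindSpec (s sub : List Char) (h : PySem.Chars.rfind s sub ≠ -1) :
    0 ≤ PySem.Chars.rfind s sub ∧ sub <+: s.drop (PySem.Chars.rfind s sub).toNat :=
  pvRfindGoSpec s sub s.length h

theorem pvNegOneLeRfind (s sub : List Char) : -1 ≤ PySem.Chars.rfind s sub :=
  pvRfindGoNeg s sub s.length

-- value.find(sub, k) == -1  ⟺  no occurrence of sub at any index ≥ k
theorem pvFindFromNegIff (cs sub : List Char) (hs : sub ≠ []) (k : Nat) :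
    PySem.Chars.findFrom cs sub (k : Int) none = -1 ↔ ∀ j, k ≤ j → ¬ sub <+: cs.drop j := by
  by_cases hk : k ≤ cs.length
  · rw [PySem.Chars.findFrom_natCast_eq_neg_one_iff cs sub k hk]
    rw [← PySem.Chars.isIn_iff_infix, ← PySem.Chars.exists_prefix_drop_iff_isIn]
    constructor
    · intro hno j hj hpre
      exact hno ⟨j - k, by rw [List.drop_drop, (by omega : k + (j - k) = j)]; exact hpre⟩
    · rintro hall ⟨j, hj⟩
      rw [List.drop_drop] at hj
      exact hall (k + j) (by omega) hj
  · rw [iff_true_left (pvFindFromOOB cs sub k (by omega))]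
    intro j hj hpre
    rw [List.drop_eq_nil_of_le (by omega)] at hpre
    exact hs (List.prefix_nil.mp hpre)

-- a one-char prefix is a head lookup
theorem pvSingletonPrefix (c : Char) (l : List Char) : ([c] <+: l) ↔ l[0]? = some c := by
  constructor
  · rintro ⟨t, rfl⟩; simp
  · intro h
    cases l with
    | nil => simp at h
    | cons a t => simp at h; exact ⟨t, by simp [h]⟩

-- no ')' occurs inside an occurrence of "getTexture("
theorem pvNoCloseInGT (cs : List Char) (i d : Nat) (hd : d < 11) (hg : pvGT <+: cs.drop i) :
    ¬ [')'] <+: cs.drop (i + d) := by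
  intro hp
  rw [pvSingletonPrefix, List.getElem?_drop, Nat.add_zero] at hp
  obtain ⟨t, ht⟩ := hg
  have hgd : cs[i + d]? = pvGT[d]? := by
    have h0 : (cs.drop i)[d]? = pvGT[d]? := by
      rw [← ht, List.getElem?_append_left (by simp [pvGT]; omega)]
    rwa [List.getElem?_drop] at h0
  rw [hp] at hgd
  interval_cases d <;> simp [pvGT] at hgd

-- key loop invariant: for pos ≤ (last ')')+1, A's loop answers exactly 'is "getTexture(" after the last ")"'
theorem pvLoopAEq (cs : List Char) (pos : Nat) :
    (pos : Int) ≤ PySem.Chars.rfind cs [')'] + 1 →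
    pvLoopA cs pos =
      PySem.Chars.isIn pvGT (cs.drop (PySem.Chars.rfind cs [')'] + 1).toNat) := by
  have hR : -1 ≤ PySem.Chars.rfind cs [')'] := pvNegOneLeRfind cs [')']
  induction pos using pvLoopA.induct cs with
  | case1 x hidx =>
    intro _
    have hno := (pvFindFromNegIff cs pvGT (by decide) x).mp hidx
    rw [pvLoopA, dif_pos hidx]
    symm
    rw [← Bool.not_eq_true, ← PySem.Chars.exists_prefix_drop_iff_isIn]
    rintro ⟨j, hj⟩
    rw [List.drop_drop] at hj
    exact hno _ (by omega) hj
  | case2 x hidx hcp =>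
    intro _
    obtain ⟨hx, hpre, hlt⟩ := pvFindFromSpec cs pvGT (by decide) x hidx
    have hno := (pvFindFromNegIff cs [')'] (by decide) _).mp hcp
    -- no ')' at any index ≥ the found occurrence
    have hnone : ∀ j, (PySem.Chars.findFrom cs pvGT (x : Int) none).toNat ≤ j →
        ¬ [')'] <+: cs.drop j := by
      intro j hj
      by_cases hj11 : (PySem.Chars.findFrom cs pvGT (x : Int) none).toNat + 11 ≤ j
      · exact hno j hj11
      · have := pvNoCloseInGT cs _ (j - (PySem.Chars.findFrom cs pvGT (x : Int) none).toNat)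
          (by omega) hpre
        rwa [(by omega : (PySem.Chars.findFrom cs pvGT (x : Int) none).toNat +
          (j - (PySem.Chars.findFrom cs pvGT (x : Int) none).toNat) = j)] at this
    -- hence the last ')' (if any) lies strictly before it
    have hRle : (PySem.Chars.rfind cs [')'] + 1).toNat ≤
        (PySem.Chars.findFrom cs pvGT (x : Int) none).toNat := by
      by_cases hrf : PySem.Chars.rfind cs [')'] = -1
      · rw [hrf]; simp
      · obtain ⟨h0, hp0⟩ := pvRfindSpec cs [')'] hrf
        by_contra hcon
        exact hnone (PySem.Chars.rfind cs [')']).toNat (by omega) hp0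
    rw [pvLoopA, dif_neg hidx, dif_pos hcp]
    symm
    rw [← PySem.Chars.exists_prefix_drop_iff_isIn]
    refine ⟨(PySem.Chars.findFrom cs pvGT (x : Int) none).toNat -
      (PySem.Chars.rfind cs [')'] + 1).toNat, ?_⟩
    rw [List.drop_drop, (by omega : (PySem.Chars.rfind cs [')'] + 1).toNat +
      ((PySem.Chars.findFrom cs pvGT (x : Int) none).toNat -
        (PySem.Chars.rfind cs [')'] + 1).toNat) =
      (PySem.Chars.findFrom cs pvGT (x : Int) none).toNat)]
    exact hpre
  | case3 x hidx hcp ih =>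
    intro hpos
    obtain ⟨hc1, hc2, hc3⟩ := pvFindFromSpec cs [')'] (by decide) _ hcp
    have hge := pvRfindGe cs [')'] _ (by omega) hc2
    rw [pvLoopA, dif_neg hidx, dif_neg hcp]
    exact ih (by omega)

-- tag check: A's 'last "<" after last ">"' test ⟺ B's '"<" occurs after the last ">"'
theorem pvTagEq (cs : List Char) :
    (PySem.Chars.rfind cs ['<'] ≠ -1 ∧ PySem.Chars.rfind cs ['>'] < PySem.Chars.rfind cs ['<'])
      ↔ PySem.Chars.isIn ['<'] (cs.drop (PySem.Chars.rfind cs ['>'] + 1).toNat) = true := by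
  have hgt : -1 ≤ PySem.Chars.rfind cs ['>'] := pvNegOneLeRfind cs ['>']
  rw [← PySem.Chars.exists_prefix_drop_iff_isIn]
  constructor
  · rintro ⟨hlo, hlt⟩
    obtain ⟨h0, hp⟩ := pvRfindSpec cs ['<'] hlo
    refine ⟨(PySem.Chars.rfind cs ['<']).toNat - (PySem.Chars.rfind cs ['>'] + 1).toNat, ?_⟩
    rw [List.drop_drop, (by omega : (PySem.Chars.rfind cs ['>'] + 1).toNat +
      ((PySem.Chars.rfind cs ['<']).toNat - (PySem.Chars.rfind cs ['>'] + 1).toNat) =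
      (PySem.Chars.rfind cs ['<']).toNat)]
    exact hp
  · rintro ⟨j, hj⟩
    rw [List.drop_drop] at hj
    have hlen : (PySem.Chars.rfind cs ['>'] + 1).toNat + j < cs.length := by
      by_contra hcon
      rw [List.drop_eq_nil_of_le (by omega)] at hj
      exact (by decide : (['<'] : List Char) ≠ []) (List.prefix_nil.mp hj)
    have hge := pvRfindGe cs ['<'] _ (by omega) hj
    constructor
    · intro hbad; rw [hbad] at hge; omega
    · omega

-- ===== VERDICT (by name: the statement is the Claim_ definition above) =====
theorem validate_print_media_info_py_spec : Claim_equal_validate_print_media_info_py := by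
  intro key value _
  unfold Spec_validate_print_media_info_py
  unfold validate_print_media_info_py validate_print_media_info_py_alt
  cases hk : PySem.Str.endswith key "_info" with
  | false => simp
  | true =>
    simp only [Bool.not_true, Bool.false_eq_true, if_false]
    have h1 : -1 ≤ PySem.Chars.rfind value.toList [')'] := pvNegOneLeRfind _ _
    have h2 : -1 ≤ PySem.Chars.rfind value.toList ['>'] := pvNegOneLeRfind _ _
    rw [PySem.List.slice_from value.toList
      (a := PySem.Chars.rfind value.toList [')'] + 1) (by omega)]
    rw [PySem.List.slice_from value.toList
      (a := PySem.Chars.rfind value.toList ['>'] + 1) (by omega)]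
    rw [pvLoopAEq value.toList 0 (by omega)]
    by_cases hg : PySem.Chars.isIn pvGT
        (value.toList.drop (PySem.Chars.rfind value.toList [')'] + 1).toNat) = true
    · rw [if_pos hg, if_pos hg]
    · rw [if_neg hg, if_neg hg]
      by_cases ht : PySem.Chars.isIn ['<']
          (value.toList.drop (PySem.Chars.rfind value.toList ['>'] + 1).toNat) = true
      · obtain ⟨hlo, hlt⟩ := (pvTagEq value.toList).mpr ht
        rw [if_pos hlo, if_pos hlt, if_pos ht]
      · rw [if_neg ht]
        by_cases hlo : PySem.Chars.rfind value.toList ['<'] ≠ -1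
        · rw [if_pos hlo]
          rw [if_neg (fun hlt => ht ((pvTagEq value.toList).mp ⟨hlo, hlt⟩))]
        · rw [if_neg hlo]
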